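-- pv_equiv track=rewrite | github.com/BiqiangWang/leetcode | DataStructure/array/977.py | advancedagain
-- ===== SOURCE A (Python) =====
-- from typing import List
--
-- def advancedagain(nums: List[int]) -> List[int]:
--     #  timeout 折半插入排序， 略有提升但依然超时
--     n = len(nums)
--     nums[0] = nums[0] * nums[0]
--     for i in range(1, n):
--         temp = nums[i] * nums[i]
--         low, high = 0, i - 1
--         while low <= high:
--             mid = int((high + low) / 2)
--             if temp > nums[mid]:
--                 low = mid + 1
--             else:
--                 high = mid - 1
--         for k in range(i - 1, high, -1):
--             nums[k + 1] = nums[k]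
--         nums[low] = temp
--     return nums
-- ===== SOURCE B (Python) =====
-- def advancedagain(nums):
--     return sorted(x * x for x in nums)
-- ===== Notes on version B (the rewrite author's own statement) =====
-- stated objective: faster
-- what changed: replaces A's in-place binary-insertion sort of the squares (quadratic shifting) by squaring every element and calling sorted once
-- crash fix: On the empty list A raises IndexError (it unconditionally squares the first element in place); B returns the empty list. — e.g. on advancedagain([]): A raises IndexError, B returns []
import Mathlib
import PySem

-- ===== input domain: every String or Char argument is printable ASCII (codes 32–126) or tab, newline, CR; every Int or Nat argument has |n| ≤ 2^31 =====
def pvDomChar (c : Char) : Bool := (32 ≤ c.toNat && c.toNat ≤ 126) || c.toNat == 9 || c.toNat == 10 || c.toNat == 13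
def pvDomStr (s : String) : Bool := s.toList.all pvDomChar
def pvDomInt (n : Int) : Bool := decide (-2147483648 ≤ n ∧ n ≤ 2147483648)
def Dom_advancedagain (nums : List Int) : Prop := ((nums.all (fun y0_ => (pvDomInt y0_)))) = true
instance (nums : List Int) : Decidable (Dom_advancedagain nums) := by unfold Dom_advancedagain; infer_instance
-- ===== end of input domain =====

-- B squares all elements and sorts once instead of A's in-place binary-insertion sort;
-- A mutates its argument in place, B does not — the equivalence proved here is about the return value only.

-- ===== PORT A =====
-- the 'while low <= high' binary search; returns the final (low, high).
-- int((high+low)/2) is ported as floor division: inside the loop low ≤ high and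
-- 0 ≤ low, so low+high ≥ 0 and Python's truncation equals flooring there.
def pvBinSearch (xs : List Int) (temp low high : Int) : Int × Int :=
  if _h : low ≤ high then
    let mid := PySem.Int.floordiv (low + high) 2
    if temp > PySem.List.pyGetD xs mid 0 then
      pvBinSearch xs temp (mid + 1) high
    else
      pvBinSearch xs temp low (mid - 1)
  else (low, high)
termination_by (high + 1 - low).toNat
decreasing_by
  all_goals
    have := PySem.Int.floordiv_two_mid_bounds (lo := low) (hi := high) _h
    omega

-- 'for k in range(i-1, high, -1): nums[k+1] = nums[k]'
def pvShiftLoop (xs : List Int) (k high : Int) : List Int :=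
  if high < k then
    pvShiftLoop (PySem.List.pySetD xs (k + 1) (PySem.List.pyGetD xs k 0)) (k - 1) high
  else xs
termination_by (k - high).toNat

-- one iteration of 'for i in range(1, n)'
def pvStep (xs : List Int) (i : Int) : List Int :=
  let temp := PySem.List.pyGetD xs i 0 * PySem.List.pyGetD xs i 0
  let lh := pvBinSearch xs temp 0 (i - 1)
  let xs' := pvShiftLoop xs (i - 1) lh.2
  PySem.List.pySetD xs' lh.1 temp

def advancedagain (nums : List Int) : List Int :=
  let n : Int := nums.length
  let nums1 := PySem.List.pySetD nums 0
      (PySem.List.pyGetD nums 0 0 * PySem.List.pyGetD nums 0 0)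
  (PySem.List.pyRange 1 n 1).foldl pvStep nums1

-- ===== PORT B =====
def advancedagain_alt (nums : List Int) : List Int :=
  PySem.List.sorted (nums.map (fun x => x * x)) (fun x => x) false

-- ===== PRECONDITION & SPEC =====
-- A unconditionally squares the first element in place, so it raises IndexError on the empty list.
def Pre_advancedagain (nums : List Int) : Prop := nums ≠ []
instance (nums : List Int) : Decidable (Pre_advancedagain nums) := by unfold Pre_advancedagain; infer_instance
def pvWitness_advancedagain : List Int := [3, -1, 2]

-- On the empty list A raises IndexError (it unconditionally squares the first element); B returns the empty list.
def Raises_advancedagain (nums : List Int) : Prop := nums = []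
instance (nums : List Int) : Decidable (Raises_advancedagain nums) := by unfold Raises_advancedagain; infer_instance
def pvRaiseWitness_advancedagain : List Int := []
def pvRaiseWitnessOut_advancedagain : List Int := []

def Spec_advancedagain (nums : List Int) (out : List Int) : Prop := out = advancedagain_alt nums
instance (nums : List Int) (out : List Int) : Decidable (Spec_advancedagain nums out) := by unfold Spec_advancedagain; infer_instance

-- ===== CLAIM (what is proved, stated in full; the proofs are below) =====
def Claim_equal_advancedagain : Prop := ∀ (nums : List Int), Dom_advancedagain nums → Pre_advancedagain nums → Spec_advancedagain nums (advancedagain nums)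
def Claim_raises_advancedagain : Prop := (∀ (nums : List Int), Dom_advancedagain nums → Raises_advancedagain nums → ¬ Pre_advancedagain nums) ∧ (Dom_advancedagain (pvRaiseWitness_advancedagain) ∧ Raises_advancedagain (pvRaiseWitness_advancedagain) ∧ advancedagain_alt (pvRaiseWitness_advancedagain) = pvRaiseWitnessOut_advancedagain)

-- ===== LEMMAS AND PROOFS =====

lemma binSearch_spec (xs : List Int) (temp m : Int)
    (hmono : ∀ p q : Int, 0 ≤ p → p ≤ q → q < m → PySem.List.pyGetD xs p 0 ≤ PySem.List.pyGetD xs q 0) :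
    ∀ low high : Int, 0 ≤ low → low ≤ high + 1 → high < m →
    (∀ j : Int, 0 ≤ j → j < low → PySem.List.pyGetD xs j 0 < temp) →
    (∀ j : Int, high < j → j < m → temp ≤ PySem.List.pyGetD xs j 0) →
    ∃ l : Int, pvBinSearch xs temp low high = (l, l - 1) ∧ 0 ≤ l ∧ l ≤ m ∧
      (∀ j : Int, 0 ≤ j → j < l → PySem.List.pyGetD xs j 0 < temp) ∧
      (∀ j : Int, l ≤ j → j < m → temp ≤ PySem.List.pyGetD xs j 0) := by
  intro low high
  induction low, high using pvBinSearch.induct xs temp with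
  | case1 low high h mid hgt ih =>
    intro h0 hle hhm hlo hhi
    rw [pvBinSearch]
    simp only [h, dite_true]
    have hmid := PySem.Int.floordiv_two_mid_bounds (lo := low) (hi := high) h
    simp only [show mid = PySem.Int.floordiv (low + high) 2 from rfl] at *
    rw [if_pos hgt]
    exact ih (by omega) (by omega) (by omega)
      (fun j hj hjl => lt_of_le_of_lt (hmono j mid hj (by omega) (by omega)) hgt)
      hhi
  | case2 low high h mid hgt ih =>
    intro h0 hle hhm hlo hhi
    rw [pvBinSearch]
    simp only [h, dite_true]
    have hmid := PySem.Int.floordiv_two_mid_bounds (lo := low) (hi := high) h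
    simp only [show mid = PySem.Int.floordiv (low + high) 2 from rfl] at *
    rw [if_neg hgt]
    rw [not_lt] at hgt
    exact ih h0 (by omega) (by omega) hlo
      (fun j hj hjm => le_trans hgt (hmono mid j (by omega) (by omega) hjm))
  | case3 low high h =>
    intro h0 hle hhm hlo hhi
    refine ⟨low, ?_, h0, by omega, hlo, fun j hj hjm => hhi j (by omega) hjm⟩
    rw [pvBinSearch]
    simp only [h, dite_false]
    rw [show high = low - 1 from by omega]

lemma shift_spec (xs : List Int) (l m : Nat) (hlm : l ≤ m) (hm : m < xs.length) :
    pvShiftLoop xs ((m : Int) - 1) ((l : Int) - 1)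
      = xs.take (l+1) ++ (xs.drop l).take (m - l) ++ xs.drop (m+1) := by
  induction m, hlm using Nat.le_induction generalizing xs with
  | base =>
    rw [pvShiftLoop]
    rw [if_neg (by omega)]
    simp [List.take_append_drop]
  | succ m hlm ih =>
    rw [pvShiftLoop]
    rw [if_pos (by omega)]
    have e1 : ((m+1:Nat):Int) - 1 = (m:Int) := by push_cast; omega
    rw [e1]
    have hset : PySem.List.pySetD xs ((m:Int) + 1) (PySem.List.pyGetD xs (m:Int) 0)
        = xs.set (m+1) (xs[m]'(by omega)) := by
      rw [PySem.List.pyGetD_eq_getElem xs 0 (by omega) (by exact_mod_cast by omega),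
          PySem.List.pySetD_of_nonneg xs _ (by omega)]
      simp
    rw [hset]
    rw [ih (xs.set (m+1) (xs[m]'(by omega))) (by simpa using by omega)]
    rw [List.take_set_of_le (by omega)]
    rw [List.drop_set, if_neg (by omega), List.take_set_of_le (by omega)]
    rw [List.drop_set, if_neg (by omega)]
    rw [List.drop_eq_getElem_cons (show m+1 < xs.length by omega)]
    rw [show m+1-(m+1) = 0 from by omega, List.set_cons_zero]
    rw [show m+1-l = (m-l)+1 from by omega,
        List.take_succ_eq_append_getElem (show m-l < (xs.drop l).length by simp; omega)]
    simp only [List.getElem_drop]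
    simp [List.append_assoc, show l + (m - l) = m from by omega]


lemma pvStep_inv (nums state : List Int) (i : Nat) (h1 : 1 ≤ i) (h2 : i < nums.length)
    (hlen : state.length = nums.length)
    (hsort : (state.take i).Pairwise (· ≤ ·))
    (hperm : (state.take i).Perm ((nums.take i).map (fun x => x * x)))
    (hdrop : state.drop i = nums.drop i) :
    (pvStep state (i:Int)).length = nums.length ∧
    ((pvStep state (i:Int)).take (i+1)).Pairwise (· ≤ ·) ∧
    ((pvStep state (i:Int)).take (i+1)).Perm ((nums.take (i+1)).map (fun x => x * x)) ∧
    (pvStep state (i:Int)).drop (i+1) = nums.drop (i+1) := by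
  have hilen : i < state.length := by omega
  have hsi : state[i]'hilen = nums[i]'h2 := by
    have e : (state.drop i)[0]'(by simp; omega) = (nums.drop i)[0]'(by simp; omega) := by
      simp only [hdrop]
    simpa using e
  have hget : PySem.List.pyGetD state (i:Int) 0 = nums[i]'h2 := by
    rw [PySem.List.pyGetD_eq_getElem state 0 (by omega) (by exact_mod_cast hilen)]
    simpa using hsi
  set temp : Int := nums[i]'h2 * nums[i]'h2 with htemp
  have hmono : ∀ p q : Int, 0 ≤ p → p ≤ q → q < (i:Int) →
      PySem.List.pyGetD state p 0 ≤ PySem.List.pyGetD state q 0 := by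
    intro p q hp hpq hq
    rcases eq_or_lt_of_le hpq with rfl | hpq'
    · exact le_refl _
    · rw [PySem.List.pyGetD_eq_getElem state 0 hp (by omega),
          PySem.List.pyGetD_eq_getElem state 0 (by omega) (by omega)]
      have hlentake : (state.take i).length = i := by simp; omega
      have := (List.pairwise_iff_getElem.mp hsort) p.toNat q.toNat
        (by omega) (by omega) (by omega)
      simpa [List.getElem_take] using this
  obtain ⟨l, hbs, hl0, hlm, hlt, hge⟩ :=
    binSearch_spec state temp (i:Int) hmono 0 ((i:Int) - 1)
      (by omega) (by omega) (by omega)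
      (fun j hj hjl => absurd hjl (by omega))
      (fun j hj hjm => absurd hjm (by omega))
  have hlcast : ((l.toNat : Int)) = l := Int.toNat_of_nonneg hl0
  have hlile : l.toNat ≤ i := by omega
  have hT : pvStep state (i:Int)
      = (state.take l.toNat ++ temp :: (state.drop l.toNat).take (i - l.toNat)) ++ state.drop (i+1) := by
    simp only [pvStep, hget, hbs, ← htemp]
    rw [show (l - 1 : Int) = ((l.toNat:Int)) - 1 from by omega]
    rw [shift_spec state l.toNat i hlile (by omega)]
    rw [PySem.List.pySetD_of_nonneg _ _ hl0]
    rw [List.set_eq_take_cons_drop temp (by simp; omega)]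
    rw [List.append_assoc]
    rw [List.take_append_of_le_length (by simp; omega)]
    rw [List.take_take, show min l.toNat (l.toNat+1) = l.toNat from by omega]
    rw [List.drop_left' (by simp; omega)]
    simp [List.append_assoc]
  have hQlen : (state.take l.toNat ++ temp :: (state.drop l.toNat).take (i - l.toNat)).length = i + 1 := by
    simp; omega
  have hmemA : ∀ a ∈ state.take l.toNat, a < temp := by
    intro a ha
    obtain ⟨j, hj, rfl⟩ := List.mem_iff_getElem.mp ha
    have hjl : j < l.toNat := by simp at hj; omega
    have := hlt (j:Int) (by omega) (by omega)
    rw [PySem.List.pyGetD_eq_getElem state 0 (by omega) (by omega)] at this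
    simpa [List.getElem_take] using this
  have hmemB : ∀ b ∈ (state.drop l.toNat).take (i - l.toNat), temp ≤ b := by
    intro b hb
    obtain ⟨j, hj, rfl⟩ := List.mem_iff_getElem.mp hb
    have hjl : j < i - l.toNat := by simp at hj; omega
    have := hge (l + (j:Int)) (by omega) (by omega)
    rw [PySem.List.pyGetD_eq_getElem state 0 (by omega) (by omega)] at this
    simpa [List.getElem_take, List.getElem_drop,
      show (l + (j:Int)).toNat = l.toNat + j from by omega] using this
  have hpairQ : (state.take l.toNat ++ temp :: (state.drop l.toNat).take (i - l.toNat)).Pairwise (· ≤ ·) := by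
    rw [List.pairwise_append]
    refine ⟨?_, ?_, ?_⟩
    · have : state.take l.toNat = (state.take i).take l.toNat := by
        rw [List.take_take, show min l.toNat i = l.toNat from by omega]
      rw [this]
      exact List.Pairwise.sublist (List.take_sublist _ _) hsort
    · rw [List.pairwise_cons]
      refine ⟨hmemB, ?_⟩
      have : (state.drop l.toNat).take (i - l.toNat) = (state.take i).drop l.toNat := by
        rw [List.drop_take]
      rw [this]
      exact List.Pairwise.sublist (List.drop_sublist _ _) hsort
    · intro a ha b hb
      rcases List.mem_cons.mp hb with rfl | hb'
      · exact (hmemA a ha).le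
      · exact (hmemA a ha).le.trans (hmemB b hb')
  refine ⟨?_, ?_, ?_, ?_⟩
  · rw [hT]; simp; omega
  · rw [hT, List.take_left' hQlen]; exact hpairQ
  · rw [hT, List.take_left' hQlen]
    have p1 : (state.take l.toNat ++ temp :: (state.drop l.toNat).take (i - l.toNat)).Perm
        (temp :: state.take i) := by
      have : state.take l.toNat ++ (state.drop l.toNat).take (i - l.toNat) = state.take i := by
        rw [← List.take_add, show l.toNat + (i - l.toNat) = i from by omega]
      calc (state.take l.toNat ++ temp :: (state.drop l.toNat).take (i - l.toNat)).Perm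
            (temp :: (state.take l.toNat ++ (state.drop l.toNat).take (i - l.toNat))) := List.perm_middle
        _ = temp :: state.take i := by rw [this]
    have p2 : (temp :: state.take i).Perm (temp :: (nums.take i).map (fun x => x * x)) :=
      hperm.cons temp
    have e3 : ((nums.take (i+1)).map (fun x => x * x))
        = (nums.take i).map (fun x => x * x) ++ [temp] := by
      rw [List.take_succ_eq_append_getElem h2, List.map_append]; simp; exact htemp.symm
    rw [e3]
    exact (p1.trans p2).trans (List.perm_append_singleton temp _).symm
  · rw [hT, List.drop_left' hQlen]
    have := congrArg (List.drop 1) hdrop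
    simpa [List.drop_drop, Nat.add_comm] using this


lemma fold_inv (nums : List Int) (i : Nat) (h1 : 1 ≤ i) (h2 : i ≤ nums.length) :
    ((PySem.List.pyRange 1 (i:Int) 1).foldl pvStep
        (PySem.List.pySetD nums 0 (PySem.List.pyGetD nums 0 0 * PySem.List.pyGetD nums 0 0))).length = nums.length ∧
    (((PySem.List.pyRange 1 (i:Int) 1).foldl pvStep
        (PySem.List.pySetD nums 0 (PySem.List.pyGetD nums 0 0 * PySem.List.pyGetD nums 0 0))).take i).Pairwise (· ≤ ·) ∧
    (((PySem.List.pyRange 1 (i:Int) 1).foldl pvStep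
        (PySem.List.pySetD nums 0 (PySem.List.pyGetD nums 0 0 * PySem.List.pyGetD nums 0 0))).take i).Perm
      ((nums.take i).map (fun x => x * x)) ∧
    ((PySem.List.pyRange 1 (i:Int) 1).foldl pvStep
        (PySem.List.pySetD nums 0 (PySem.List.pyGetD nums 0 0 * PySem.List.pyGetD nums 0 0))).drop i = nums.drop i := by
  induction i, h1 using Nat.le_induction with
  | base =>
    have h0 : 0 < nums.length := by omega
    rw [show ((1:Nat):Int) = 1 from rfl, PySem.List.pyRange_one_eq_nil (by omega)]
    simp only [List.foldl_nil]
    have hg : PySem.List.pyGetD nums 0 0 = nums[0]'h0 := by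
      rw [PySem.List.pyGetD_eq_getElem nums 0 (by omega) (by exact_mod_cast h0)]
      simp
    have hs : PySem.List.pySetD nums 0 (PySem.List.pyGetD nums 0 0 * PySem.List.pyGetD nums 0 0)
        = (nums[0]'h0 * nums[0]'h0) :: nums.drop 1 := by
      rw [hg, PySem.List.pySetD_of_nonneg nums _ (by omega)]
      rw [List.set_eq_take_cons_drop _ (by omega)]
      simp
    rw [hs]
    have ht1 : nums.take 1 = [nums[0]'h0] := by
      rw [show (1:Nat) = 0 + 1 from rfl, List.take_succ_eq_append_getElem h0]
      simp
    refine ⟨by simp; omega, by simp, ?_, by simp⟩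
    rw [ht1]
    simp
  | succ i hi ih =>
    have hiN : i < nums.length := by omega
    rw [show ((i+1:Nat):Int) = (i:Int)+1 from by push_cast; ring,
        PySem.List.pyRange_one_succ_right (by omega), List.foldl_append]
    simp only [List.foldl_cons, List.foldl_nil]
    obtain ⟨a, b, c, d⟩ := ih (by omega)
    exact pvStep_inv nums _ i hi hiN a b c d

-- ===== VERDICT (by name: the statement is the Claim_ definition above) =====
theorem advancedagain_spec : Claim_equal_advancedagain := by
  intro nums _ hpre
  have hlen0 : 1 ≤ nums.length := by
    cases nums with
    | nil => exact absurd rfl hpre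
    | cons a t => simp
  obtain ⟨hL, hS, hP, _⟩ := fold_inv nums nums.length hlen0 le_rfl
  have e1 : ((PySem.List.pyRange 1 (nums.length:Int) 1).foldl pvStep
      (PySem.List.pySetD nums 0 (PySem.List.pyGetD nums 0 0 * PySem.List.pyGetD nums 0 0))).take nums.length
      = (PySem.List.pyRange 1 (nums.length:Int) 1).foldl pvStep
      (PySem.List.pySetD nums 0 (PySem.List.pyGetD nums 0 0 * PySem.List.pyGetD nums 0 0)) :=
    List.take_of_length_le (by omega)
  unfold Spec_advancedagain
  show advancedagain nums = _
  unfold advancedagain advancedagain_alt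
  refine Eq.symm (PySem.List.sorted_id_eq_of_perm_of_pairwise _ _ ?_ ?_)
  · rw [e1, List.take_length] at hP
    exact hP
  · rw [e1] at hS
    exact hS

@[simp] theorem advancedagain_raises : Claim_raises_advancedagain := by
  unfold Claim_raises_advancedagain
  exact ⟨fun nums _ h => by simp [Raises_advancedagain] at h; simp [Pre_advancedagain, h], by decide⟩
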